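-- pv_equiv track=rewrite | github.com/Abduraxmonnn/Algorithms | hackerrank/hackerrank.py | sortedSum
-- ===== SOURCE A (Python) =====
-- def sortedSum(a):
--     n = len(a)
--     b = [i for i in range(1, n + 1)]
--     ar = [0] * (n)
--     ans = 0
--     MOD = 10 ** 9 + 7
--     for i in range(len(a)):
--         for j in range(n - i):
--             ar[j + i] += a[i] * b[j]
--
--     for i in range(n):
--         ans += ar[i]
--     ans = ans % MOD
--     return ans
-- ===== SOURCE B (Python) =====
-- def sortedSum(a):
--     MOD = 10 ** 9 + 7
--     ans = 0
--     t = 0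
--     k = 0
--     for x in reversed(a):
--         k += 1
--         t += k
--         ans += x * t
--     return ans % MOD
-- ===== Notes on version B (the rewrite author's own statement) =====
-- stated objective: faster
-- what changed: A scatters a[i]*b[j] into an auxiliary array with two nested loops and then sums it; B is a single reverse pass that maintains the triangular coefficient t incrementally and accumulates x*t directly, no auxiliary array.
import Mathlib
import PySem

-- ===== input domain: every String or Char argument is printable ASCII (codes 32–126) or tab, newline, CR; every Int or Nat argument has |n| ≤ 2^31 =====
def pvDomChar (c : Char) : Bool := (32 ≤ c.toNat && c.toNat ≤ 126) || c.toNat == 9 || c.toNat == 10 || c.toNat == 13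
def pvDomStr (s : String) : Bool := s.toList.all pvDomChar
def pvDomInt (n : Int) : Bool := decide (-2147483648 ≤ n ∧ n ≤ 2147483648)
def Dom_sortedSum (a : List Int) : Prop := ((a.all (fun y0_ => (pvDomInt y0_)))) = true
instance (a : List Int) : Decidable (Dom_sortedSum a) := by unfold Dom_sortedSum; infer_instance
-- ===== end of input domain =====

-- B replaces A's quadratic scatter into the array `ar` by one reverse pass that
-- maintains the triangular coefficient incrementally (objective: faster, O(n) vs O(n^2)).

-- ===== PORT A =====
def sortedSum (a : List Int) : Int :=
  let n := a.length
  let b := PySem.List.pyRange 1 ((n : Int) + 1)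
  let ar0 : List Int := List.replicate n 0
  let ar := (PySem.List.pyRange 0 (n : Int)).foldl (fun ar i =>
      (PySem.List.pyRange 0 ((n : Int) - i)).foldl (fun ar j =>
          PySem.List.pySetD ar (j + i)
            (PySem.List.pyGetD ar (j + i) 0 + PySem.List.pyGetD a i 0 * PySem.List.pyGetD b j 0))
        ar) ar0
  let ans := (PySem.List.pyRange 0 (n : Int)).foldl (fun ans i => ans + PySem.List.pyGetD ar i 0) 0
  PySem.Int.mod ans (10 ^ 9 + 7)

-- ===== PORT B =====
def sortedSum_alt (a : List Int) : Int :=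
  let s := a.reverse.foldl (fun (st : Int × Int × Int) x =>
      let k := st.2.2 + 1
      let t := st.2.1 + k
      (st.1 + x * t, t, k)) (0, 0, 0)
  PySem.Int.mod s.1 (10 ^ 9 + 7)

-- ===== PRECONDITION & SPEC =====
def Spec_sortedSum (a : List Int) (out : Int) : Prop := out = sortedSum_alt a
instance (a : List Int) (out : Int) : Decidable (Spec_sortedSum a out) := by unfold Spec_sortedSum; infer_instance

-- ===== CLAIM (what is proved, stated in full; the proofs are below) =====
def Claim_equal_sortedSum : Prop := ∀ (a : List Int), Dom_sortedSum a → Spec_sortedSum a (sortedSum a)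

-- ===== LEMMAS AND PROOFS =====

-- triangular numbers, the common yardstick of both proofs
def tri : Nat → Int
  | 0 => 0
  | m + 1 => tri m + (m + 1)

-- the common value both pre-mod accumulators reach: Σ a[i] · tri(n - i)
def coefSum : List Int → Int
  | [] => 0
  | x :: xs => x * tri (xs.length + 1) + coefSum xs

-- add v into position k of a list: the sum grows by exactly v
lemma sum_set_add (l : List Int) (k : Nat) (v : Int) (hk : k < l.length) :
    (l.set k (l.getD k 0 + v)).sum = l.sum + v := by
  induction l generalizing k with
  | nil => simp at hk
  | cons x xs ih =>
    cases k with
    | zero => simp [List.set]; ring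
    | succ k =>
      simp only [List.set, List.getD, List.getElem?_cons_succ, List.sum_cons]
      have h2 := ih k (by simpa using hk)
      simp only [List.getD] at h2
      rw [h2]
      ring

-- B-side characterisation: the reverse fold computes (coefSum a, tri n, n)
lemma foldr_state (a : List Int) :
    a.foldr (fun x (st : Int × Int × Int) =>
        (st.1 + x * (st.2.1 + (st.2.2 + 1)), st.2.1 + (st.2.2 + 1), st.2.2 + 1)) (0, 0, 0)
      = (coefSum a, tri a.length, (a.length : Int)) := by
  induction a with
  | nil => simp [coefSum, tri]
  | cons x xs ih =>
    simp only [List.foldr, ih, coefSum, tri, List.length_cons, Prod.mk.injEq]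
    refine ⟨?_, ?_, ?_⟩ <;> push_cast <;> ring

lemma alt_eq (a : List Int) : sortedSum_alt a = PySem.Int.mod (coefSum a) (10 ^ 9 + 7) := by
  unfold sortedSum_alt
  rw [List.foldl_reverse]
  rw [show (a.foldr (fun x (st : Int × Int × Int) =>
        let k := st.2.2 + 1
        let t := st.2.1 + k
        (st.1 + x * t, t, k)) (0, 0, 0))
      = (coefSum a, tri a.length, (a.length : Int)) from foldr_state a]

-- the list b = range(1, n+1)
lemma pyRangeShift (n : Nat) :
    PySem.List.pyRange 1 ((n : Int) + 1) = (List.range n).map (fun k : Nat => (k : Int) + 1) := by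
  induction n with
  | zero => rfl
  | succ n ih =>
    have h : (((n + 1 : Nat) : Int) + 1) = ((n : Int) + 1) + 1 := by push_cast; ring
    rw [h, PySem.List.pyRange_one_succ_right (by omega), ih, List.range_succ, List.map_append]
    simp

-- A-side: values of the coefficient list b
lemma b_get (n j : Nat) (hj : j < n) :
    PySem.List.pyGetD (PySem.List.pyRange 1 ((n : Int) + 1)) (j : Int) 0 = (j : Int) + 1 := by
  rw [pyRangeShift, PySem.List.pyGetD_natCast]
  simp [List.getD, hj]

lemma foldPreservesLen (f : List Int → Int → List Int)
    (hf : ∀ ar j, (f ar j).length = ar.length) (l : List Int) (ar : List Int) :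
    (l.foldl f ar).length = ar.length := by
  induction l generalizing ar with
  | nil => rfl
  | cons x xs ih => simp [List.foldl, ih, hf]

-- inner loop: adds v · tri m to the running sum (m = n - i steps)
lemma arScatterSum (v : Int) (idx : Nat) (m : Nat) (ar : List Int)
    (h : idx + m ≤ ar.length) :
    (((List.range m).map (fun k : Nat => (k : Int))).foldl
        (fun ar j => PySem.List.pySetD ar (j + (idx : Int))
            (PySem.List.pyGetD ar (j + (idx : Int)) 0 + v * (j + 1))) ar).sum
      = ar.sum + v * tri m := by
  induction m with
  | zero => simp [tri]
  | succ m ih =>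
    rw [List.range_succ, List.map_append, List.foldl_append]
    set F := fun (ar : List Int) (j : Int) => PySem.List.pySetD ar (j + (idx : Int))
        (PySem.List.pyGetD ar (j + (idx : Int)) 0 + v * (j + 1)) with hF
    have hlen : ((((List.range m).map (fun k : Nat => (k : Int))).foldl F ar)).length = ar.length := by
      apply foldPreservesLen
      intro ar j
      simp [hF, PySem.List.length_pySetD]
    set ar' := ((List.range m).map (fun k : Nat => (k : Int))).foldl F ar with har'
    have hsum : ar'.sum = ar.sum + v * tri m := ih (by omega)
    simp only [List.map_cons, List.map_nil, List.foldl_cons, List.foldl_nil, hF]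
    rw [show ((m : Int) + (idx : Int)) = (((m + idx : Nat)) : Int) from by push_cast; ring]
    rw [PySem.List.pySetD_natCast, PySem.List.pyGetD_natCast]
    rw [sum_set_add _ _ _ (by omega), hsum]
    simp [tri]
    ring

lemma map_getD_self (l : List Int) : (List.range l.length).map (fun k => l.getD k 0) = l := by
  induction l with
  | nil => rfl
  | cons x xs ih =>
    simp only [List.length_cons, List.range_succ_eq_map, List.map_cons, List.map_map]
    refine congrArg₂ List.cons rfl ?_
    simpa [Function.comp, List.getD] using ih

-- final read-back loop = list sum
lemma readback (ar : List Int) (n : Nat) (h : ar.length = n) :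
    ((List.range n).map (fun k : Nat => (k : Int))).foldl
        (fun ans i => ans + PySem.List.pyGetD ar i 0) 0 = ar.sum := by
  subst h
  rw [PySem.List.foldl_add]
  rw [List.map_map]
  have : ((fun i => PySem.List.pyGetD ar i 0) ∘ fun k : Nat => (k : Int))
      = fun k : Nat => ar.getD k 0 := by
    funext k; simp [Function.comp, PySem.List.pyGetD_natCast]
  rw [this, map_getD_self]
  ring

-- Σ_{i<n} a[i]·tri(n-i) = coefSum a
lemma coef_total (a : List Int) :
    ((List.range a.length).map (fun i => a.getD i 0 * tri (a.length - i))).sum = coefSum a := by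
  induction a with
  | nil => rfl
  | cons x xs ih =>
    simp only [List.length_cons, List.range_succ_eq_map, List.map_cons, List.map_map,
      List.sum_cons, coefSum]
    refine congrArg₂ (· + ·) (by simp [List.getD]) ?_
    rw [← ih]
    refine congrArg List.sum (List.map_congr_left ?_)
    intro i hi
    simp only [Function.comp, Nat.succ_eq_add_one]
    rw [show (x :: xs).getD (i + 1) 0 = xs.getD i 0 from rfl]
    rw [show xs.length + 1 - (i + 1) = xs.length - i from by omega]

-- the outer loop: total of all increments after the first k iterations
lemma outer_sum (a : List Int) (ar : List Int) (k : Nat) (hk : k ≤ a.length)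
    (hlen : ar.length = a.length) :
    (((List.range k).map (fun i : Nat => (i : Int))).foldl
        (fun ar i => (PySem.List.pyRange 0 ((a.length : Int) - i)).foldl
            (fun ar j => PySem.List.pySetD ar (j + i)
                (PySem.List.pyGetD ar (j + i) 0 +
                  PySem.List.pyGetD a i 0 *
                    PySem.List.pyGetD (PySem.List.pyRange 1 ((a.length : Int) + 1)) j 0)) ar) ar).sum
      = ar.sum + ((List.range k).map (fun i => a.getD i 0 * tri (a.length - i))).sum := by
  induction k generalizing ar with
  | zero => simp
  | succ k ih =>
    rw [List.range_succ, List.map_append, List.map_append, List.foldl_append, List.sum_append]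
    set OUTER := fun (ar : List Int) (i : Int) =>
        (PySem.List.pyRange 0 ((a.length : Int) - i)).foldl
            (fun ar j => PySem.List.pySetD ar (j + i)
                (PySem.List.pyGetD ar (j + i) 0 +
                  PySem.List.pyGetD a i 0 *
                    PySem.List.pyGetD (PySem.List.pyRange 1 ((a.length : Int) + 1)) j 0)) ar
      with hO
    have hinner : ∀ (ar : List Int) (i : Int), (OUTER ar i).length = ar.length := by
      intro ar i
      apply foldPreservesLen
      intro ar j
      simp [PySem.List.length_pySetD]
    set ar' := ((List.range k).map (fun i : Nat => (i : Int))).foldl OUTER ar with har'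
    have hlen' : ar'.length = a.length := by
      rw [har', foldPreservesLen OUTER hinner, hlen]
    have hsum' := ih ar (by omega) hlen
    simp only [List.map_cons, List.map_nil, List.foldl_cons, List.foldl_nil]
    rw [hO]
    simp only []
    rw [show ((a.length : Int) - (k : Int)) = (((a.length - k : Nat)) : Int) from by omega]
    rw [PySem.List.pyRange_zero_natCast]
    rw [PySem.List.foldl_congr_mem _ _
      (fun ar j => PySem.List.pySetD ar (j + (k : Int))
        (PySem.List.pyGetD ar (j + (k : Int)) 0 + PySem.List.pyGetD a (k : Int) 0 * (j + 1))) _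
      (by
        intro acc x hx
        obtain ⟨jN, hjN, rfl⟩ := List.mem_map.mp hx
        rw [b_get a.length jN (by have := List.mem_range.mp hjN; omega)])]
    rw [arScatterSum (PySem.List.pyGetD a (k : Int) 0) k (a.length - k) ar' (by omega)]
    rw [har', hsum', PySem.List.pyGetD_natCast]
    simp
    ring

lemma a_eq (a : List Int) : sortedSum a = PySem.Int.mod (coefSum a) (10 ^ 9 + 7) := by
  unfold sortedSum
  simp only [PySem.List.pyRange_zero_natCast]
  congr 1
  rw [readback _ a.length (by
    have h1 : ∀ (ar : List Int) (i : Int),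
        ((PySem.List.pyRange 0 ((a.length : Int) - i)).foldl
          (fun ar j => PySem.List.pySetD ar (j + i)
            (PySem.List.pyGetD ar (j + i) 0 +
              PySem.List.pyGetD a i 0 *
                PySem.List.pyGetD (PySem.List.pyRange 1 ((a.length : Int) + 1)) j 0)) ar).length
        = ar.length :=
      fun ar i => foldPreservesLen _ (fun ar j => by simp [PySem.List.length_pySetD]) _ _
    simpa using foldPreservesLen _ h1 _ (List.replicate a.length 0))]
  rw [outer_sum a (List.replicate a.length 0) a.length le_rfl (by simp)]
  simpa [List.getD] using coef_total a

-- ===== VERDICT (by name: the statement is the Claim_ definition above) =====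
theorem sortedSum_spec : Claim_equal_sortedSum := by
  intro a _
  unfold Spec_sortedSum
  rw [a_eq, alt_eq]
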